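-- pv_equiv track=rewrite | github.com/serhii-soboliev/crackinginterview | crackinginterview-source/algo/leetcode/contest/bw14/bw14_5132_hex.py | hex_speack
-- ===== SOURCE A (Python) =====
-- def hex_speack(hex_num):
--     res = []
--     for s in hex_num:
--         if s in ["a", "b", "c", "d", "e", "f"]:
--             res.append(s.upper())
--         elif s == "1":
--             res.append("I")
--         elif s == "0":
--             res.append("O")
--         else:
--             return "ERROR"
--     return "".join(res)
-- ===== SOURCE B (Python) =====
-- _TR = str.maketrans("abcdef10", "ABCDEFIO")
--
-- def hex_speack(hex_num):
--     if all(c in "abcdef10" for c in hex_num):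
--         return hex_num.translate(_TR)
--     return "ERROR"
-- ===== Notes on version B (the rewrite author's own statement) =====
-- stated objective: idiomatic
-- what changed: Replaced the fused per-character scan with early return that appends to a list with a validate-all pass over the allowed alphabet followed by a single str.translate transform.
import Mathlib
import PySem

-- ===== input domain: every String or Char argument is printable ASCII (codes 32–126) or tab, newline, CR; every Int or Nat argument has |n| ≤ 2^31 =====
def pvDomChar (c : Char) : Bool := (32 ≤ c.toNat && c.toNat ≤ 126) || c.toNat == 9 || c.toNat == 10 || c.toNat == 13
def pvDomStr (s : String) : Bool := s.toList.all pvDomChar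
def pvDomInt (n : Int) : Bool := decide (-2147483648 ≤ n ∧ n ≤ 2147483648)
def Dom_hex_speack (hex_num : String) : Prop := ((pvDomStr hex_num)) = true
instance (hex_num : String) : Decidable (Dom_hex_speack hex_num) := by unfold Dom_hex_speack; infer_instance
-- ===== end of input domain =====

-- B validates all characters against the allowed set "abcdef10" and then applies a single translate pass (idiomatic two-pass decomposition).


-- ===== PORT A =====
-- loop over the characters, appending to res, with early return "ERROR"
def hexLoopA (res : List Char) : List Char → String
  | [] => String.mk res.reverse
  | s :: rest =>
    if s ∈ ['a', 'b', 'c', 'd', 'e', 'f'] then hexLoopA (s.toUpper :: res) rest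
    else if s = '1' then hexLoopA ('I' :: res) rest
    else if s = '0' then hexLoopA ('O' :: res) rest
    else "ERROR"

def hex_speack (hex_num : String) : String := hexLoopA [] hex_num.toList

-- ===== PORT B =====
-- the translation table str.maketrans("abcdef10","ABCDEFIO")
def trB (c : Char) : Char :=
  if c = 'a' then 'A' else if c = 'b' then 'B' else if c = 'c' then 'C'
  else if c = 'd' then 'D' else if c = 'e' then 'E' else if c = 'f' then 'F'
  else if c = '1' then 'I' else if c = '0' then 'O' else c

def hex_speack_alt (hex_num : String) : String :=
  if hex_num.toList.all (fun c => c ∈ "abcdef10".toList) then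
    String.mk (hex_num.toList.map trB)
  else "ERROR"

-- ===== PRECONDITION & SPEC =====
def Spec_hex_speack (hex_num : String) (out : String) : Prop := out = hex_speack_alt hex_num
instance (hex_num : String) (out : String) : Decidable (Spec_hex_speack hex_num out) := by unfold Spec_hex_speack; infer_instance

-- ===== CLAIM (what is proved, stated in full; the proofs are below) =====
def Claim_equal_hex_speack : Prop := ∀ (hex_num : String), Dom_hex_speack hex_num → Spec_hex_speack hex_num (hex_speack hex_num)

-- ===== LEMMAS AND PROOFS =====
theorem allowed_chars : "abcdef10".toList = ['a','b','c','d','e','f','1','0'] := by decide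

theorem hexLoopA_char (l : List Char) (res : List Char) :
    hexLoopA res l =
      if l.all (fun c => c ∈ "abcdef10".toList) then String.mk (res.reverse ++ l.map trB)
      else "ERROR" := by
  rw [allowed_chars]
  induction l generalizing res with
  | nil => simp [hexLoopA]
  | cons c rest ih =>
    by_cases h : c ∈ ['a', 'b', 'c', 'd', 'e', 'f']
    · fin_cases h <;>
        · rw [hexLoopA, if_pos (by decide), ih]
          simp [trB, Char.toUpper]
          split <;> rfl
    · by_cases h1 : c = '1'
      · subst h1
        rw [hexLoopA, if_neg (by decide), if_pos rfl, ih]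
        simp [trB]
      · by_cases h0 : c = '0'
        · subst h0
          rw [hexLoopA, if_neg (by decide), if_neg (by decide), if_pos rfl, ih]
          simp [trB]
        · have hc : c ∉ (['a','b','c','d','e','f','1','0'] : List Char) := by
            simp at h ⊢
            tauto
          rw [hexLoopA, if_neg h, if_neg h1, if_neg h0]
          simp at hc
          simp [hc]

-- ===== VERDICT (by name: the statement is the Claim_ definition above) =====
theorem hex_speack_spec : Claim_equal_hex_speack := by
  intro s _
  unfold Spec_hex_speack hex_speack hex_speack_alt
  rw [hexLoopA_char, allowed_chars]
  simp
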